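-- pv_equiv track=rewrite | github.com/Joshua7792/jacobdashboard | cert_tracker/scripts/import_pdf.py | build_table_header
-- ===== SOURCE A (Python) =====
-- def build_table_header(table: list[list], header_idx: int, first_data_idx: int) -> list[str]:
--     header_rows = table[header_idx:first_data_idx]
--     width = max((len(row or []) for row in header_rows), default=0)
--     combined: list[str] = []
--
--     for col_idx in range(width):
--         parts: list[str] = []
--         for row in header_rows:
--             if col_idx >= len(row):
--                 continue
--             cell = " ".join(str(row[col_idx] or "").split()).strip()
--             if not cell:
--                 continue
--             if not parts or parts[-1] != cell:
--                 parts.append(cell)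
--         combined.append(" ".join(parts).strip())
--
--     return combined
-- ===== SOURCE B (Python) =====
-- def build_table_header(table: list[list], header_idx: int, first_data_idx: int) -> list[str]:
--     header_rows = table[header_idx:first_data_idx]
--     width = max((len(row or []) for row in header_rows), default=0)
--     # one row-major pass: transpose the normalized non-blank cells into per-column lists
--     columns = [[] for _ in range(width)]
--     for row in header_rows:
--         for i, cell in enumerate(row):
--             text = " ".join(str(cell or "").split()).strip()
--             if text:
--                 columns[i].append(text)
--     # collapse runs of equal adjacent cells by pairing each cell with its predecessor
--     return [" ".join(c for prev, c in zip([None] + col, col) if prev != c).strip()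
--             for col in columns]
-- ===== Notes on version B (the rewrite author's own statement) =====
-- stated objective: alternative
-- what changed: A rescans all header rows once per column with a last-element-checking accumulator; B makes a single row-major pass that transposes normalized non-blank cells into per-column lists, then collapses runs of equal adjacent cells via a zip-with-predecessor comprehension and joins.
import Mathlib
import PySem

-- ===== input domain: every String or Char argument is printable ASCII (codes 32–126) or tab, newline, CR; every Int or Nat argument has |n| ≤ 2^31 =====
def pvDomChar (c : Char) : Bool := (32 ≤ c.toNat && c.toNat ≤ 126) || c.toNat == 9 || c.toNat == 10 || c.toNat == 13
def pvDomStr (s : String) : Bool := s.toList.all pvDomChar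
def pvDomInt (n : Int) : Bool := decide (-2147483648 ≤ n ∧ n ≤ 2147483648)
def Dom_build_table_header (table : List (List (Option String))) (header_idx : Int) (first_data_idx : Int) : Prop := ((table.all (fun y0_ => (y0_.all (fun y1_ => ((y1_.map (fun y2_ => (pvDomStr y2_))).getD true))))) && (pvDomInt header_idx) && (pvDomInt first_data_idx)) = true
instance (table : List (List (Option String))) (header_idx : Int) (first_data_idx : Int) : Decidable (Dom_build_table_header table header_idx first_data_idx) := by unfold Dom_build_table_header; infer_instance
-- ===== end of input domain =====

-- B is an alternative decomposition: instead of A's per-column rescan of the header rows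
-- with a last-element-checking accumulator, B transposes normalized non-blank cells into
-- per-column lists in one row-major pass, then collapses adjacent duplicates per column.

-- ===== PORT A =====
-- shared cell normalization: " ".join(str(cell or "").split()).strip()
def pvNorm (o : Option String) : String :=
  PySem.Str.strip (PySem.Str.join " " (PySem.Str.split₀ (match o with | none => "" | some s => s)))

def build_table_header (table : List (List (Option String))) (header_idx : Int) (first_data_idx : Int) : List String :=
  let header_rows := PySem.List.slice table (some header_idx) (some first_data_idx)
  -- max((len(row or []) for row in header_rows), default=0); 'row or []' has row's length
  let width : Int := (PySem.List.max? (header_rows.map (fun row => PySem.List.len row)) (fun x => x)).getD 0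
  (PySem.List.pyRange 0 width).foldl (fun combined col_idx =>
    let parts := header_rows.foldl (fun parts row =>
      if col_idx ≥ PySem.List.len row then parts
      else
        -- row[col_idx]: the guard above makes 0 ≤ col_idx < len row, so pyGetD is exact
        let cell := pvNorm (PySem.List.pyGetD row col_idx none)
        if cell = "" then parts
        else if parts = [] ∨ parts.getLast? ≠ some cell then parts ++ [cell]
        else parts) []
    combined ++ [PySem.Str.strip (PySem.Str.join " " parts)]) []

-- ===== PORT B =====
def build_table_header_alt (table : List (List (Option String))) (header_idx : Int) (first_data_idx : Int) : List String :=
  let header_rows := PySem.List.slice table (some header_idx) (some first_data_idx)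
  let width : Int := (PySem.List.max? (header_rows.map (fun row => PySem.List.len row)) (fun x => x)).getD 0
  let columns0 : List (List String) := List.replicate width.toNat []
  let columns := header_rows.foldl (fun cols row =>
    (PySem.List.enumerate row).foldl (fun cols ic =>
      let text := pvNorm ic.2
      if text = "" then cols
      -- columns[i].append(text); i = ic.1 is the nonnegative enumerate index
      else cols.modify ic.1.toNat (fun l => l ++ [text])) cols) columns0
  columns.map (fun col =>
    PySem.Str.strip (PySem.Str.join " "
      -- zip([None] + col, col): pair each cell with its predecessor (None sentinel)
      (((none :: col.map some).zip col).filterMap (fun pc => if pc.1 ≠ some pc.2 then some pc.2 else none))))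

-- ===== PRECONDITION & SPEC =====
def Spec_build_table_header (table : List (List (Option String))) (header_idx : Int) (first_data_idx : Int) (out : List String) : Prop := out = build_table_header_alt table header_idx first_data_idx
instance (table : List (List (Option String))) (header_idx : Int) (first_data_idx : Int) (out : List String) : Decidable (Spec_build_table_header table header_idx first_data_idx out) := by unfold Spec_build_table_header; infer_instance

-- ===== CLAIM (what is proved, stated in full; the proofs are below) =====
def Claim_equal_build_table_header : Prop := ∀ (table : List (List (Option String))) (header_idx : Int) (first_data_idx : Int), Dom_build_table_header table header_idx first_data_idx → Spec_build_table_header table header_idx first_data_idx (build_table_header table header_idx first_data_idx)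

-- ===== LEMMAS AND PROOFS =====

-- the (zero- or one-element) contribution of a row to column k
def pvCell (row : List (Option String)) (k : Nat) : List String :=
  if h : k < row.length then (if pvNorm row[k] = "" then [] else [pvNorm row[k]]) else []

-- column k of the transposed header: normalized non-blank cells, top to bottom
def pvCol (hr : List (List (Option String))) (k : Nat) : List String :=
  hr.flatMap (fun row => pvCell row k)

-- collapse runs of equal adjacent cells, given the previous kept cell
def pvCollapse : Option String → List String → List String
  | _, [] => []
  | prev, c :: cs => if prev = some c then pvCollapse prev cs else c :: pvCollapse (some c) cs

lemma pvA_parts (hr : List (List (Option String))) (k : Nat) (acc : List String) :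
    hr.foldl (fun parts row =>
      if (k : Int) ≥ PySem.List.len row then parts
      else
        let cell := pvNorm (PySem.List.pyGetD row (k : Int) none)
        if cell = "" then parts
        else if parts = [] ∨ parts.getLast? ≠ some cell then parts ++ [cell]
        else parts) acc
    = acc ++ pvCollapse acc.getLast? (pvCol hr k) := by
  induction hr generalizing acc with
  | nil => simp [pvCol, pvCollapse]
  | cons row hr ih =>
    have hcol : pvCol (row :: hr) k = pvCell row k ++ pvCol hr k := by simp [pvCol]
    by_cases h : k < row.length
    · have hlt : ¬ ((k : Int) ≥ PySem.List.len row) := by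
        simp [PySem.List.len_eq]; exact_mod_cast h
      have hget : PySem.List.pyGetD row (k : Int) none = row[k] := by
        rw [PySem.List.pyGetD_natCast]; exact List.getD_eq_getElem _ _ h
      by_cases hc : pvNorm row[k] = ""
      · simp only [List.foldl_cons, hlt, if_false, hget, hc, if_true]
        rw [ih, hcol]
        simp [pvCell, h, hc]
      · have hcell : pvCell row k = [pvNorm row[k]] := by simp [pvCell, h, hc]
        by_cases hlast : acc.getLast? = some (pvNorm row[k])
        · have hcond : ¬ (acc = [] ∨ acc.getLast? ≠ some (pvNorm row[k])) := by
            push Not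
            refine ⟨fun hnil => by simp [hnil] at hlast, hlast⟩
          simp only [List.foldl_cons, hlt, if_false, hget, hc, hcond, if_false]
          rw [ih, hcol, hcell]
          simp [pvCollapse, hlast]
        · have hcond : acc = [] ∨ acc.getLast? ≠ some (pvNorm row[k]) := Or.inr hlast
          simp only [List.foldl_cons, hlt, if_false, hget, hc, hcond, if_true]
          rw [ih, hcol, hcell]
          rw [List.getLast?_concat]
          simp [pvCollapse, hlast, List.append_assoc]
    · have hge : (k : Int) ≥ PySem.List.len row := by
        simp [PySem.List.len_eq]; omega
      simp only [List.foldl_cons, hge, if_true]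
      rw [ih, hcol]
      simp [pvCell, h]

lemma pvB_collapse (cs : List String) (p : Option String) :
    ((p :: cs.map some).zip cs).filterMap
      (fun pc => if pc.1 ≠ some pc.2 then some pc.2 else none) = pvCollapse p cs := by
  induction cs generalizing p with
  | nil => simp [pvCollapse]
  | cons c cs ih =>
    simp only [List.map_cons, List.zip_cons_cons, List.filterMap_cons]
    by_cases hp : p = some c
    · simp [pvCollapse, hp, ← ih (some c)]
    · simp [pvCollapse, hp, ← ih (some c)]

lemma pvCell_concat (row : List (Option String)) (c : Option String) (k : Nat) :
    pvCell (row ++ [c]) k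
      = pvCell row k ++ (if k = row.length then (if pvNorm c = "" then [] else [pvNorm c]) else []) := by
  rcases lt_trichotomy k row.length with h | h | h
  · have h' : k < (row ++ [c]).length := by rw [List.length_append]; omega
    have hg : (row ++ [c])[k]'h' = row[k] := List.getElem_append_left h
    have hne : k ≠ row.length := by omega
    simp [pvCell, h, h', hg, hne]
    intro h2
    exact absurd h2 (by omega)
  · subst h
    have h' : row.length < (row ++ [c]).length := by
      rw [List.length_append, List.length_cons, List.length_nil]; omega
    have hg : (row ++ [c])[row.length]'h' = c := by simp
    simp [pvCell, lt_irrefl, h', hg]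
  · have h1 : ¬ k < row.length := by omega
    have h' : ¬ k < (row ++ [c]).length := by
      rw [List.length_append, List.length_cons, List.length_nil]; omega
    have hne : k ≠ row.length := by omega
    simp [pvCell, h1, h', hne]
    exact fun h2 => absurd h2 (by omega)

lemma pvInner_getElem? (row : List (Option String)) (cols : List (List String)) (k : Nat) :
    ((PySem.List.enumerate row).foldl (fun cols (ic : Int × Option String) =>
        if pvNorm ic.2 = "" then cols
        else cols.modify ic.1.toNat (fun l => l ++ [pvNorm ic.2])) cols)[k]?
    = cols[k]?.map (fun l => l ++ pvCell row k) := by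
  induction row using List.reverseRecOn with
  | nil =>
    simp [PySem.List.enumerate, pvCell]
  | append_singleton row c ih =>
    rw [PySem.List.enumerate_append]
    simp only [List.foldl_append]
    rw [PySem.List.enumerate_cons, PySem.List.enumerate_nil]
    simp only [List.foldl_cons, List.foldl_nil]
    rw [pvCell_concat]
    by_cases hc : pvNorm c = ""
    · rw [if_pos hc, ih]
      simp [hc]
    · simp only [hc, if_false, ite_self]
      have htn : ((0 : Int) + (row.length : Int)).toNat = row.length := by omega
      rw [htn, List.getElem?_modify, ih]
      by_cases hk : row.length = k
      · simp [hk, hc, Option.map_map, Function.comp_def, List.append_assoc]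
      · have hk' : ¬ k = row.length := fun hh => hk hh.symm
        simp [hk, hk']

lemma pvOuter_getElem? (hr : List (List (Option String))) (cols : List (List String)) (k : Nat) :
    ((hr.foldl (fun cols row =>
        (PySem.List.enumerate row).foldl (fun cols (ic : Int × Option String) =>
          if pvNorm ic.2 = "" then cols
          else cols.modify ic.1.toNat (fun l => l ++ [pvNorm ic.2])) cols) cols))[k]?
    = cols[k]?.map (fun l => l ++ pvCol hr k) := by
  induction hr generalizing cols with
  | nil => simp [pvCol]
  | cons row hr ih =>
    simp only [List.foldl_cons]
    rw [ih, pvInner_getElem?]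
    simp [pvCol, Option.map_map, Function.comp_def, List.append_assoc]

lemma pvColumns_eq (hr : List (List (Option String))) (w : Nat) :
    (hr.foldl (fun cols row =>
        (PySem.List.enumerate row).foldl (fun cols (ic : Int × Option String) =>
          if pvNorm ic.2 = "" then cols
          else cols.modify ic.1.toNat (fun l => l ++ [pvNorm ic.2])) cols) (List.replicate w []))
    = (List.range w).map (fun k => pvCol hr k) := by
  apply List.ext_getElem?
  intro k
  rw [pvOuter_getElem?]
  by_cases hk : k < w
  · simp [List.getElem?_replicate, hk]
  · rw [List.getElem?_eq_none (by simpa using Nat.le_of_not_lt hk),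
        List.getElem?_eq_none (by simpa using Nat.le_of_not_lt hk)]
    rfl

-- ===== VERDICT (by name: the statement is the Claim_ definition above) =====
theorem build_table_header_spec : Claim_equal_build_table_header := by
  intro table header_idx first_data_idx _dom
  unfold Spec_build_table_header build_table_header build_table_header_alt
  simp only []
  generalize PySem.List.slice table (some header_idx) (some first_data_idx) = hr
  generalize (PySem.List.max? (hr.map (fun row => PySem.List.len row)) (fun x => x)).getD 0 = width
  rw [PySem.List.foldl_append_singleton_eq_map, PySem.List.pyRange_one, List.nil_append,
      List.map_map, pvColumns_eq hr width.toNat, List.map_map]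
  have hw : (width - 0).toNat = width.toNat := by omega
  rw [hw]
  apply List.map_congr_left
  intro k _
  simp only [Function.comp]
  rw [show (0 : Int) + (k : Int) = (k : Int) by omega]
  rw [pvA_parts hr k [], pvB_collapse]
  simp
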